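-- pv_equiv track=rewrite | github.com/KennethJefferson/cc_sdk_knowledge_extractor | skills/project-maker/scripts/project_maker.py | _get_prerequisites
-- ===== SOURCE A (Python) =====
-- from typing import Dict, List, Optional, Tuple, Any
--
-- def _get_prerequisites(tech_stack: List[str]) -> str:
--     """Get prerequisites based on tech stack."""
--     prereqs = []
--     if 'Rust' in tech_stack:
--         prereqs.append('Rust 1.70+ (https://rustup.rs)')
--     if any(t in tech_stack for t in ['JavaScript', 'TypeScript', 'React', 'Express']):
--         prereqs.append('Node.js 18+ (https://nodejs.org)')
--     if any(t in tech_stack for t in ['Python', 'FastAPI', 'Flask', 'Django']):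
--         prereqs.append('Python 3.10+ (https://python.org)')
--     return '\n- '.join(prereqs) if prereqs else 'See documentation'
-- ===== SOURCE B (Python) =====
-- _TECH_TO_SLOT = {
--     'Rust': 0,
--     'JavaScript': 1, 'TypeScript': 1, 'React': 1, 'Express': 1,
--     'Python': 2, 'FastAPI': 2, 'Flask': 2, 'Django': 2,
-- }
-- _SLOT_TEXT = [
--     'Rust 1.70+ (https://rustup.rs)',
--     'Node.js 18+ (https://nodejs.org)',
--     'Python 3.10+ (https://python.org)',
-- ]
--
-- def _get_prerequisites(tech_stack):
--     """Get prerequisites based on tech stack (single pass over the stack via an inverted tech->slot index)."""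
--     hit = {_TECH_TO_SLOT[t] for t in tech_stack if t in _TECH_TO_SLOT}
--     prereqs = [text for slot, text in enumerate(_SLOT_TEXT) if slot in hit]
--     return '\n- '.join(prereqs) if prereqs else 'See documentation'
-- ===== Notes on version B (the rewrite author's own statement) =====
-- stated objective: alternative
-- what changed: Inverted the iteration: instead of A's three rule-by-rule membership scans of the stack, B makes a single pass over tech_stack, looking each tech up in an inverted tech-to-slot dictionary, collects the hit slots in a set, and emits the fixed slot texts whose slot was hit.
import Mathlib
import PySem

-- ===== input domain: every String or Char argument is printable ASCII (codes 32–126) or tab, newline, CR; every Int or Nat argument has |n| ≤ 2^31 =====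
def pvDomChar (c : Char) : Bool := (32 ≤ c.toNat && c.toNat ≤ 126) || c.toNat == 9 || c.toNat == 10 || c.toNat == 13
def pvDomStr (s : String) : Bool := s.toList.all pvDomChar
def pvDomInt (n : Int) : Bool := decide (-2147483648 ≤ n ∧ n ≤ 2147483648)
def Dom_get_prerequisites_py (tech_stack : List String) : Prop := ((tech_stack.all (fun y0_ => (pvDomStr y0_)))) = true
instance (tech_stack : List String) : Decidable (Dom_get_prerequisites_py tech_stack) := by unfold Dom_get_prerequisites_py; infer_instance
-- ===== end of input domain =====

-- B inverts A's iteration: one pass over tech_stack through an inverted tech->slot dictionary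
-- collecting hit slots in a set, then emitting the fixed slot texts (alternative; same cost).

-- ===== PORT A =====
def get_prerequisites_py (tech_stack : List String) : String :=
  let prereqs : List String := []
  let prereqs := if tech_stack.contains "Rust" then prereqs ++ ["Rust 1.70+ (https://rustup.rs)"] else prereqs
  let prereqs := if ["JavaScript", "TypeScript", "React", "Express"].any (fun t => tech_stack.contains t)
    then prereqs ++ ["Node.js 18+ (https://nodejs.org)"] else prereqs
  let prereqs := if ["Python", "FastAPI", "Flask", "Django"].any (fun t => tech_stack.contains t)
    then prereqs ++ ["Python 3.10+ (https://python.org)"] else prereqs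
  if prereqs ≠ [] then String.intercalate "\n- " prereqs else "See documentation"

-- ===== PORT B =====
def pvTechToSlot : PySem.Dict String Int :=
  PySem.Dict.ofList
    [("Rust", 0),
     ("JavaScript", 1), ("TypeScript", 1), ("React", 1), ("Express", 1),
     ("Python", 2), ("FastAPI", 2), ("Flask", 2), ("Django", 2)]

def pvSlotText : List String :=
  ["Rust 1.70+ (https://rustup.rs)",
   "Node.js 18+ (https://nodejs.org)",
   "Python 3.10+ (https://python.org)"]

-- one step of the set comprehension: add _TECH_TO_SLOT[t] when t is a key
def pvAddSlot (s : PySem.Set Int) (t : String) : PySem.Set Int :=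
  match PySem.Dict.get? pvTechToSlot t with
  | some i => PySem.Set.add s i
  | none => s

def get_prerequisites_py_alt (tech_stack : List String) : String :=
  -- hit = {_TECH_TO_SLOT[t] for t in tech_stack if t in _TECH_TO_SLOT}
  let hit : PySem.Set Int := tech_stack.foldl pvAddSlot PySem.Set.empty
  -- prereqs = [text for slot, text in enumerate(_SLOT_TEXT) if slot in hit]
  let prereqs := ((PySem.List.enumerate pvSlotText 0).filter
      (fun p => PySem.Set.contains hit p.1)).map Prod.snd
  if prereqs ≠ [] then String.intercalate "\n- " prereqs else "See documentation"

-- ===== PRECONDITION & SPEC =====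
def Spec_get_prerequisites_py (tech_stack : List String) (out : String) : Prop := out = get_prerequisites_py_alt tech_stack
instance (tech_stack : List String) (out : String) : Decidable (Spec_get_prerequisites_py tech_stack out) := by unfold Spec_get_prerequisites_py; infer_instance

-- ===== CLAIM (what is proved, stated in full; the proofs are below) =====
def Claim_equal_get_prerequisites_py : Prop := ∀ (tech_stack : List String), Dom_get_prerequisites_py tech_stack → Spec_get_prerequisites_py tech_stack (get_prerequisites_py tech_stack)

-- ===== LEMMAS AND PROOFS =====

-- membership in B's accumulated slot set = some tech of the stack maps to that slot
theorem pv_mem_hit (ts : List String) (init : PySem.Set Int) (i : Int) :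
    (i ∈ ts.foldl pvAddSlot init)
    ↔ (i ∈ init ∨ ∃ t ∈ ts, PySem.Dict.get? pvTechToSlot t = some i) := by
  induction ts generalizing init with
  | nil => simp
  | cons h t ih =>
    simp only [List.foldl_cons]
    rw [ih]
    cases hg : PySem.Dict.get? pvTechToSlot h with
    | none =>
      have hstep : pvAddSlot init h = init := by simp [pvAddSlot, hg]
      rw [hstep]
      constructor
      · rintro (hmem | ⟨u, hu, hp⟩)
        · exact Or.inl hmem
        · exact Or.inr ⟨u, List.mem_cons_of_mem _ hu, hp⟩
      · rintro (hmem | ⟨u, hu, hp⟩)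
        · exact Or.inl hmem
        · rcases List.mem_cons.mp hu with rfl | hu'
          · rw [hp] at hg; cases hg
          · exact Or.inr ⟨u, hu', hp⟩
    | some j =>
      have hstep : pvAddSlot init h = PySem.Set.add init j := by simp [pvAddSlot, hg]
      rw [hstep]
      constructor
      · rintro (hmem | ⟨u, hu, hp⟩)
        · rcases (PySem.Set.mem_add init j i).1 hmem with hmem' | rfl
          · exact Or.inl hmem'
          · exact Or.inr ⟨h, by simp, hg⟩
        · exact Or.inr ⟨u, List.mem_cons_of_mem _ hu, hp⟩
      · rintro (hmem | ⟨u, hu, hp⟩)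
        · exact Or.inl ((PySem.Set.mem_add init j i).2 (Or.inl hmem))
        · rcases List.mem_cons.mp hu with rfl | hu'
          · rw [hg] at hp
            injection hp with hji
            subst hji
            exact Or.inl ((PySem.Set.mem_add init j j).2 (Or.inr rfl))
          · exact Or.inr ⟨u, hu', hp⟩

-- the entries of the literal inverted index
theorem pv_items : pvTechToSlot.items =
    [("Rust", (0:Int)),
     ("JavaScript", 1), ("TypeScript", 1), ("React", 1), ("Express", 1),
     ("Python", 2), ("FastAPI", 2), ("Flask", 2), ("Django", 2)] := by decide

-- the inverted lookup hits slot 0 exactly on 'Rust'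
theorem pv_lookup_slot0 (t : String) :
    PySem.Dict.get? pvTechToSlot t = some 0 ↔ t = "Rust" := by
  by_cases h0 : t = "Rust"; · subst h0; decide
  by_cases h1 : t = "JavaScript"; · subst h1; decide
  by_cases h2 : t = "TypeScript"; · subst h2; decide
  by_cases h3 : t = "React"; · subst h3; decide
  by_cases h4 : t = "Express"; · subst h4; decide
  by_cases h5 : t = "Python"; · subst h5; decide
  by_cases h6 : t = "FastAPI"; · subst h6; decide
  by_cases h7 : t = "Flask"; · subst h7; decide
  by_cases h8 : t = "Django"; · subst h8; decide
  simp [PySem.Dict.get?, pv_items, h0, Ne.symm h0, Ne.symm h1, Ne.symm h2, Ne.symm h3,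
    Ne.symm h4, Ne.symm h5, Ne.symm h6, Ne.symm h7, Ne.symm h8]

-- the inverted lookup hits slot 1 exactly on the Node techs
theorem pv_lookup_slot1 (t : String) :
    PySem.Dict.get? pvTechToSlot t = some 1
      ↔ (t = "JavaScript" ∨ t = "TypeScript" ∨ t = "React" ∨ t = "Express") := by
  by_cases h0 : t = "Rust"; · subst h0; decide
  by_cases h1 : t = "JavaScript"; · subst h1; decide
  by_cases h2 : t = "TypeScript"; · subst h2; decide
  by_cases h3 : t = "React"; · subst h3; decide
  by_cases h4 : t = "Express"; · subst h4; decide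
  by_cases h5 : t = "Python"; · subst h5; decide
  by_cases h6 : t = "FastAPI"; · subst h6; decide
  by_cases h7 : t = "Flask"; · subst h7; decide
  by_cases h8 : t = "Django"; · subst h8; decide
  simp [PySem.Dict.get?, pv_items, h1, h2, h3, h4, Ne.symm h0, Ne.symm h1, Ne.symm h2, Ne.symm h3,
    Ne.symm h4, Ne.symm h5, Ne.symm h6, Ne.symm h7, Ne.symm h8]

-- the inverted lookup hits slot 2 exactly on the Python techs
theorem pv_lookup_slot2 (t : String) :
    PySem.Dict.get? pvTechToSlot t = some 2
      ↔ (t = "Python" ∨ t = "FastAPI" ∨ t = "Flask" ∨ t = "Django") := by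
  by_cases h0 : t = "Rust"; · subst h0; decide
  by_cases h1 : t = "JavaScript"; · subst h1; decide
  by_cases h2 : t = "TypeScript"; · subst h2; decide
  by_cases h3 : t = "React"; · subst h3; decide
  by_cases h4 : t = "Express"; · subst h4; decide
  by_cases h5 : t = "Python"; · subst h5; decide
  by_cases h6 : t = "FastAPI"; · subst h6; decide
  by_cases h7 : t = "Flask"; · subst h7; decide
  by_cases h8 : t = "Django"; · subst h8; decide
  simp [PySem.Dict.get?, pv_items, h5, h6, h7, h8, Ne.symm h0, Ne.symm h1, Ne.symm h2, Ne.symm h3,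
    Ne.symm h4, Ne.symm h5, Ne.symm h6, Ne.symm h7, Ne.symm h8]

-- hit characterizations per slot
theorem pv_hit0 (ts : List String) :
    ((0:Int) ∈ ts.foldl pvAddSlot ([] : PySem.Set Int)) ↔ "Rust" ∈ ts := by
  rw [pv_mem_hit]; simp [pv_lookup_slot0]

theorem pv_hit1 (ts : List String) :
    ((1:Int) ∈ ts.foldl pvAddSlot ([] : PySem.Set Int))
      ↔ ("JavaScript" ∈ ts ∨ "TypeScript" ∈ ts ∨ "React" ∈ ts ∨ "Express" ∈ ts) := by
  rw [pv_mem_hit]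
  simp only [pv_lookup_slot1, List.not_mem_nil, false_or]
  constructor
  · rintro ⟨u, hu, (rfl | rfl | rfl | rfl)⟩ <;> simp_all
  · rintro (h | h | h | h)
    exacts [⟨_, h, Or.inl rfl⟩, ⟨_, h, Or.inr (Or.inl rfl)⟩,
      ⟨_, h, Or.inr (Or.inr (Or.inl rfl))⟩, ⟨_, h, Or.inr (Or.inr (Or.inr rfl))⟩]

theorem pv_hit2 (ts : List String) :
    ((2:Int) ∈ ts.foldl pvAddSlot ([] : PySem.Set Int))
      ↔ ("Python" ∈ ts ∨ "FastAPI" ∈ ts ∨ "Flask" ∈ ts ∨ "Django" ∈ ts) := by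
  rw [pv_mem_hit]
  simp only [pv_lookup_slot2, List.not_mem_nil, false_or]
  constructor
  · rintro ⟨u, hu, (rfl | rfl | rfl | rfl)⟩ <;> simp_all
  · rintro (h | h | h | h)
    exacts [⟨_, h, Or.inl rfl⟩, ⟨_, h, Or.inr (Or.inl rfl)⟩,
      ⟨_, h, Or.inr (Or.inr (Or.inl rfl))⟩, ⟨_, h, Or.inr (Or.inr (Or.inr rfl))⟩]

-- the enumerate of the literal slot-text table
theorem pv_enum : PySem.List.enumerate pvSlotText 0 =
    [((0:Int), "Rust 1.70+ (https://rustup.rs)"),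
     (1, "Node.js 18+ (https://nodejs.org)"),
     (2, "Python 3.10+ (https://python.org)")] := by decide

-- ===== VERDICT (by name: the statement is the Claim_ definition above) =====
set_option maxHeartbeats 8000000 in
theorem get_prerequisites_py_spec : Claim_equal_get_prerequisites_py := by
  intro ts _
  unfold Spec_get_prerequisites_py get_prerequisites_py get_prerequisites_py_alt
  rw [pv_enum]
  by_cases hb0 : "Rust" ∈ ts <;>
  by_cases hb1 : "JavaScript" ∈ ts <;> by_cases hb2 : "TypeScript" ∈ ts <;>
  by_cases hb3 : "React" ∈ ts <;> by_cases hb4 : "Express" ∈ ts <;>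
  by_cases hb5 : "Python" ∈ ts <;> by_cases hb6 : "FastAPI" ∈ ts <;>
  by_cases hb7 : "Flask" ∈ ts <;> by_cases hb8 : "Django" ∈ ts <;>
  simp [pv_hit0, pv_hit1, pv_hit2, hb0, hb1, hb2, hb3, hb4, hb5, hb6, hb7, hb8]
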